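-- pv_equiv track=rewrite | github.com/Tayjsl97/EmoMusicTV | utils.py | bar_padding
-- ===== SOURCE A (Python) =====
-- def bar_padding(melody):
--     for i in range(len(melody)):
--         last = melody[i].index(0)
--         new_data_i = melody[i][:last]
--         for j in range(last + 1, len(melody[i])):
--             if melody[i][j] == 0:
--                 new_data_i.extend(melody[i][last:j])
--                 for k in range(42 - (j - last - 1)):
--                     new_data_i.append(1)
--                 last = j
--         new_data_i.extend(melody[i][last:])
--         for k in range(42 - (len(melody[i]) - last - 1)):
--             new_data_i.append(1)
--         melody[i]=new_data_i
--     return melody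
-- ===== SOURCE B (Python) =====
-- def _pad(xs):
--     # xs is empty or starts with a 0; peel one bar (the leading 0 and its run
--     # of nonzero values), pad it to the fixed bar length 43, recurse on the rest
--     if not xs:
--         return []
--     run = []
--     for v in xs[1:]:
--         if v == 0:
--             break
--         run.append(v)
--     bar = [xs[0]] + run
--     return bar + [1] * (43 - len(bar)) + _pad(xs[len(bar):])
--
--
-- def bar_padding(melody):
--     for i in range(len(melody)):
--         row = melody[i]
--         first = row.index(0)
--         melody[i] = row[:first] + _pad(row[first:])
--     return melody
-- ===== Notes on version B (the rewrite author's own statement) =====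
-- stated objective: alternative
-- what changed: B reformulates the task as recursion on the bar structure: it peels off one bar at a time (the leading zero plus its run of nonzero values, found by a take-while scan), pads each bar to the fixed bar length 43, and recurses on the remainder, instead of A's single index-driven scan that tracks the previous zero position and extends on each zero found; rows with no zero still raise ValueError via row.index(0) and are excluded by Pre_.
-- outside the precondition, e.g. on bar_padding([[1, 2]]): A raises ValueError, B raises ValueError
import Mathlib
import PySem

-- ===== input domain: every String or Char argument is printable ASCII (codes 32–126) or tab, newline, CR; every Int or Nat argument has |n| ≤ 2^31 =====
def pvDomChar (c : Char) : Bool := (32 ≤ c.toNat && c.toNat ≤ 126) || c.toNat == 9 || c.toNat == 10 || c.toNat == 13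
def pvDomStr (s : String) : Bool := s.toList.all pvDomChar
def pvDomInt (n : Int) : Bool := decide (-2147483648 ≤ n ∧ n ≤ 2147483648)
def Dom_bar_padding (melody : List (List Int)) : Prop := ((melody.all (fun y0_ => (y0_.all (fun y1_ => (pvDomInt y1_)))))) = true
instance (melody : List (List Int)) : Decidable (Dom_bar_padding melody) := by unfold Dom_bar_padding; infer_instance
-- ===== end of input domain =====

-- B rebuilds each row by recursion on its bar structure (peel the leading zero and its
-- run of nonzero values, pad that bar to the fixed length 43, recurse on the rest)
-- instead of A's index-driven scan; same return value. Both Pythons rebind melody[i]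
-- in place and return melody — the equivalence proved here is about the return value.

-- ===== PORT A =====
-- body of A's i-th outer-loop iteration (melody[i] = rowA melody[i])
def rowA (row : List Int) : List Int :=
  match PySem.List.index? row 0 with
  | none => row   -- Python: melody[i].index(0) raises ValueError; excluded by Pre_
  | some last0 =>
    let st := (PySem.List.pyRange ((last0 : Int) + 1) (row.length : Int)).foldl
      (fun (st : Int × List Int) j =>
        if PySem.List.pyGet? row j = some 0 then
          let acc := st.2 ++ PySem.List.slice row (some st.1) (some j)
          let acc := (PySem.List.pyRange 0 (42 - (j - st.1 - 1))).foldl (fun a _ => a ++ [(1 : Int)]) acc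
          (j, acc)
        else st)
      ((last0 : Int), PySem.List.slice row none (some (last0 : Int)))
    let acc := st.2 ++ PySem.List.slice row (some st.1) none
    (PySem.List.pyRange 0 (42 - ((row.length : Int) - st.1 - 1))).foldl (fun a _ => a ++ [(1 : Int)]) acc

def bar_padding (melody : List (List Int)) : List (List Int) := melody.map rowA

-- ===== PORT B =====
-- port of Source B's _pad: peel one bar (leading 0 plus its nonzero run), pad to 43, recurse
def padBars : List Int → List Int
  | [] => []
  | x :: rest =>
    let run := rest.takeWhile (fun v => v != 0)   -- Source B's break-loop collecting the run
    let bar := x :: run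
    bar ++ PySem.List.pyRepeat [(1 : Int)] (43 - (bar.length : Int)) ++ padBars (rest.drop run.length)
termination_by xs => xs.length
decreasing_by simp

-- body of B's i-th outer-loop iteration
def rowB (row : List Int) : List Int :=
  match PySem.List.index? row 0 with
  | none => row   -- Python: row.index(0) raises ValueError; excluded by Pre_
  | some first =>
    PySem.List.slice row none (some (first : Int)) ++ padBars (PySem.List.slice row (some (first : Int)) none)

def bar_padding_alt (melody : List (List Int)) : List (List Int) := melody.map rowB

-- ===== PRECONDITION & SPEC =====
-- Pre_ excludes exactly the inputs where some row has no 0: there Python A (and B) raises ValueError.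
def Pre_bar_padding (melody : List (List Int)) : Prop := ∀ row ∈ melody, (0 : Int) ∈ row
instance (melody : List (List Int)) : Decidable (Pre_bar_padding melody) := by unfold Pre_bar_padding; infer_instance
def pvWitness_bar_padding : List (List Int) := [[5, 0, 7, 0], [0, 3]]

def Spec_bar_padding (melody : List (List Int)) (out : List (List Int)) : Prop := out = bar_padding_alt melody
instance (melody : List (List Int)) (out : List (List Int)) : Decidable (Spec_bar_padding melody out) := by unfold Spec_bar_padding; infer_instance

-- ===== CLAIM (what is proved, stated in full; the proofs are below) =====
def Claim_equal_bar_padding : Prop := ∀ (melody : List (List Int)), Dom_bar_padding melody → Pre_bar_padding melody → Spec_bar_padding melody (bar_padding melody)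

-- ===== LEMMAS AND PROOFS =====

-- A's inner padding loop 'for k in range(m): append 1' appends replicate m.toNat 1
lemma ones_fold (m : Int) (acc : List Int) :
    (PySem.List.pyRange 0 m).foldl (fun a _ => a ++ [(1 : Int)]) acc = acc ++ List.replicate m.toNat 1 := by
  rw [PySem.List.foldl_append_singleton_eq_map (f := fun _ => (1 : Int))]
  simp [List.map_const', PySem.List.length_pyRange_one]

lemma takeWhile_stop {α : Type} (p : α → Bool) :
    ∀ (xs : List α) (h : (xs.takeWhile p).length < xs.length), p (xs[(xs.takeWhile p).length]) = false := by
  intro xs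
  induction xs with
  | nil => intro h; simp at h
  | cons a t ih =>
    intro h
    by_cases hp : p a
    · simp only [List.takeWhile_cons, hp, if_true] at h ⊢
      simpa using ih (by simpa using h)
    · simp only [Bool.not_eq_true] at hp
      simp [hp]

lemma takeWhile_elem {α : Type} (p : α → Bool) (xs : List α) (i : Nat)
    (hi : i < (xs.takeWhile p).length) (hx : i < xs.length) : p (xs[i]) = true := by
  have heq := (List.takeWhile_prefix (l := xs) (p := p)).getElem (i := i) hi
  have h := List.mem_takeWhile_imp (List.getElem_mem hi)
  rw [heq] at h
  exact h

lemma padBars_cons (x : Int) (rest : List Int) :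
    padBars (x :: rest) = (x :: rest.takeWhile (fun v => v != 0))
      ++ PySem.List.pyRepeat [(1 : Int)] (43 - (((rest.takeWhile (fun v => v != 0)).length + 1 : Nat) : Int))
      ++ padBars (rest.drop (rest.takeWhile (fun v => v != 0)).length) := by
  rw [padBars]
  simp [List.length_cons]

lemma main (row : List Int) : ∀ (fuel l : Nat) (acc : List Int),
    row.length - l ≤ fuel → ∀ (hl : l < row.length), row[l] = 0 →
    (let st := ((PySem.List.pyRange ((l : Int) + 1) (row.length : Int)).filter
        (fun j => decide (PySem.List.pyGet? row j = some 0))).foldl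
        (fun (st : Int × List Int) j =>
          (j, st.2 ++ (PySem.List.slice row (some st.1) (some j) ++ List.replicate (42 - (j - st.1 - 1)).toNat 1)))
        ((l : Int), acc);
      st.2 ++ (PySem.List.slice row (some st.1) none ++ List.replicate (42 - ((row.length : Int) - st.1 - 1)).toNat 1))
    = acc ++ padBars (row.drop l) := by
  intro fuel
  induction fuel with
  | zero => intro l acc hf hl h0; omega
  | succ f ih =>
    intro l acc hf hl h0
    have hdrop : row.drop l = row[l] :: row.drop (l + 1) := List.drop_eq_getElem_cons hl
    set rest := row.drop (l + 1) with hrest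
    set run := rest.takeWhile (fun v => v != 0) with hrun
    have hrestlen : rest.length = row.length - (l + 1) := by simp [hrest]
    have hrunle : run.length ≤ rest.length := (List.takeWhile_prefix _).length_le
    set j := l + 1 + run.length with hj
    -- transfer an index into rest to the corresponding index of row
    have key : ∀ (i n : Nat) (hx : i < rest.length) (he : n = l + 1 + i) (hn : n < row.length),
        rest[i]'hx = row[n]'hn := by
      intro i n hx he hn
      subst he
      have h2 : rest[i]? = row[l + 1 + i]? := by rw [hrest, List.getElem?_drop]
      rw [List.getElem?_eq_getElem hx, List.getElem?_eq_getElem hn] at h2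
      exact Option.some.inj h2
    -- no zero strictly between l and j
    have hrow_ne : ∀ n, l < n → n < j → ∀ (hn : n < row.length), row[n] ≠ 0 := by
      intro n h1 h2 hn
      have hi : n - (l + 1) < run.length := by omega
      have hx : n - (l + 1) < rest.length := by omega
      have hne := takeWhile_elem _ rest _ hi hx
      rw [key (n - (l + 1)) n hx (by omega) hn] at hne
      simpa using hne
    have hfilter_ne : ∀ (a b : Int), (l : Int) ≤ a → b ≤ (j : Int) → b ≤ (row.length : Int) →
        (PySem.List.pyRange (a + 1) b).filter (fun j' => decide (PySem.List.pyGet? row j' = some 0)) = [] := by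
      intro a b ha hb hblen
      rw [List.filter_eq_nil_iff]
      intro x hx
      rw [PySem.List.mem_pyRange_one] at hx
      obtain ⟨n, rfl⟩ := Int.eq_ofNat_of_zero_le (by omega : (0 : Int) ≤ x)
      have h1 : l < n := by omega
      have h2 : n < j := by
        have : (n : Int) < (j : Int) := by omega
        exact_mod_cast this
      have hn : n < row.length := by
        have : (n : Int) < (row.length : Int) := by omega
        exact_mod_cast this
      have := hrow_ne n h1 h2 hn
      simp [PySem.List.pyGet?_natCast, List.getElem?_eq_getElem hn, this]
    by_cases hm : run.length < rest.length
    · -- there is a next zero at position j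
      have hjlt : j < row.length := by omega
      have hjz : row[j] = 0 := by
        have hs := takeWhile_stop (fun v => v != 0) rest (by rw [← hrun]; omega)
        rw [key ((rest.takeWhile (fun v => v != 0)).length) j (by rw [← hrun]; omega)
              (by rw [← hrun]) hjlt] at hs
        simpa using hs
      have hsplit : PySem.List.pyRange ((l : Int) + 1) (row.length : Int)
          = PySem.List.pyRange ((l : Int) + 1) (j : Int)
            ++ (j : Int) :: PySem.List.pyRange ((j : Int) + 1) (row.length : Int) := by
        have h3 : (j : Int) < (row.length : Int) := by exact_mod_cast hjlt
        rw [PySem.List.pyRange_one_append ((l : Int) + 1) (j : Int) (row.length : Int)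
              (by omega) h3.le, PySem.List.pyRange_one_cons h3]
      have hjget : PySem.List.pyGet? row ((j : Nat) : Int) = some 0 := by
        simp [PySem.List.pyGet?_natCast, List.getElem?_eq_getElem hjlt, hjz]
      rw [hsplit, List.filter_append, hfilter_ne (l : Int) (j : Int) le_rfl le_rfl (by exact_mod_cast hjlt.le),
          List.filter_cons]
      simp only [hjget, decide_true, if_true, List.nil_append, List.foldl_cons]
      -- the first step of the fold
      have hslice : PySem.List.slice row (some (l : Int)) (some (j : Int)) = row[l] :: run := by
        rw [PySem.List.slice_natCast, hdrop, hj]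
        obtain ⟨t, ht⟩ := List.takeWhile_prefix (l := rest) (p := fun v => v != 0)
        rw [← hrun] at ht
        rw [show l + 1 + run.length - l = run.length + 1 from by omega, List.take_succ_cons, ← ht, List.take_left]
      have hcount : (42 - ((j : Int) - (l : Int) - 1)).toNat = (43 - ((run.length + 1 : Nat) : Int)).toNat := by
        congr 1; push_cast; omega
      have hstep := ih j (acc ++ (PySem.List.slice row (some (l : Int)) (some (j : Int))
          ++ List.replicate (42 - ((j : Int) - (l : Int) - 1)).toNat 1)) (by omega) hjlt hjz
      simp only at hstep
      rw [hstep, hdrop, padBars_cons, ← hrun, PySem.List.pyRepeat_singleton,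
          hslice, hcount, hrest, List.drop_drop, show l + 1 + run.length = j from hj.symm]
      simp [List.append_assoc]
    · -- no further zero: the run extends to the end of the row
      have hmeq : run.length = rest.length := le_antisymm hrunle (by omega)
      have hreq : run = rest := (List.takeWhile_prefix _).eq_of_length hmeq
      have hjend : j = row.length := by omega
      rw [hfilter_ne (l : Int) (row.length : Int) le_rfl (by omega) le_rfl]
      simp only [List.foldl_nil]
      have hslice : PySem.List.slice row (some (l : Int)) none = row.drop l := PySem.List.slice_from_natCast row l
      have hcount : (42 - ((row.length : Int) - (l : Int) - 1)).toNat = (43 - ((rest.length + 1 : Nat) : Int)).toNat := by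
        congr 1; push_cast; omega
      rw [hslice, hcount, hdrop, padBars_cons, ← hrun, hreq, PySem.List.pyRepeat_singleton]
      simp [List.drop_length, padBars]

-- the per-row bodies agree on rows containing a 0
lemma row_eq (row : List Int) (h0 : (0 : Int) ∈ row) : rowA row = rowB row := by
  have hsome : (PySem.List.index? row 0).isSome := (PySem.List.index?_isSome_iff row 0).mpr h0
  obtain ⟨last0, hidx⟩ := Option.isSome_iff_exists.mp hsome
  obtain ⟨hk, hval, hfirst⟩ := PySem.List.getElem_of_index?_eq_some hidx
  unfold rowA rowB
  simp only [hidx, ones_fold, List.append_assoc]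
  rw [PySem.List.foldl_ite_eq_foldl_filter
      (p := fun j => PySem.List.pyGet? row j = some 0)
      (f := fun (st : Int × List Int) j =>
        (j, st.2 ++ (PySem.List.slice row (some st.1) (some j)
              ++ List.replicate (42 - (j - st.1 - 1)).toNat 1)))]
  rw [PySem.List.slice_from_natCast]
  exact main row row.length last0 (PySem.List.slice row none (some (last0 : Int))) (by omega) hk hval

-- ===== VERDICT (by name: the statement is the Claim_ definition above) =====
theorem bar_padding_spec : Claim_equal_bar_padding := by
  intro melody _ hpre
  unfold Spec_bar_padding bar_padding bar_padding_alt
  exact List.map_congr_left (fun row hr => row_eq row (hpre row hr))
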